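-- pv_equiv track=rewrite | github.com/gptdevansh/AgentScout | backend/app/agents/judge.py | _find_closest_candidate
-- ===== SOURCE A (Python) =====
-- def _find_closest_candidate(text: str, candidates: list[str]) -> int:
--     """Find the candidate that most closely matches text (simple overlap)."""
--     if not text:
--         return -1
--     text_lower = text.lower()
--     best_idx = -1
--     best_overlap = 0
--     for i, c in enumerate(candidates):
--         # Count shared words
--         c_words = set(c.lower().split())
--         t_words = set(text_lower.split())
--         overlap = len(c_words & t_words)
--         if overlap > best_overlap:
--             best_overlap = overlap
--             best_idx = i
--     return best_idx if best_overlap >= 3 else -1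
-- ===== SOURCE B (Python) =====
-- def _find_closest_candidate(text: str, candidates: list[str]) -> int:
--     """Inverted-index re-implementation: index words -> candidate indices,
--     count shared distinct words per candidate, then pick the first argmax
--     if it reaches the threshold of 3."""
--     if not text:
--         return -1
--     index = {}
--     for i, c in enumerate(candidates):
--         for w in set(c.lower().split()):
--             index.setdefault(w, []).append(i)
--     counts = {}
--     for w in set(text.lower().split()):
--         for i in index.get(w, []):
--             counts[i] = counts.get(i, 0) + 1
--     best = -1
--     for i in range(len(candidates)):
--         ci = counts.get(i, 0)
--         if ci >= 3 and (best == -1 or ci > counts.get(best, 0)):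
--             best = i
--     return best
-- ===== Notes on version B (the rewrite author's own statement) =====
-- stated objective: alternative
-- what changed: Replaces the per-candidate set-intersection loop by an inverted index from words to candidate indices plus a counter dict, then a separate first-argmax scan with the >=3 threshold, instead of A's single fold carrying (best_idx, best_overlap).
import Mathlib
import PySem

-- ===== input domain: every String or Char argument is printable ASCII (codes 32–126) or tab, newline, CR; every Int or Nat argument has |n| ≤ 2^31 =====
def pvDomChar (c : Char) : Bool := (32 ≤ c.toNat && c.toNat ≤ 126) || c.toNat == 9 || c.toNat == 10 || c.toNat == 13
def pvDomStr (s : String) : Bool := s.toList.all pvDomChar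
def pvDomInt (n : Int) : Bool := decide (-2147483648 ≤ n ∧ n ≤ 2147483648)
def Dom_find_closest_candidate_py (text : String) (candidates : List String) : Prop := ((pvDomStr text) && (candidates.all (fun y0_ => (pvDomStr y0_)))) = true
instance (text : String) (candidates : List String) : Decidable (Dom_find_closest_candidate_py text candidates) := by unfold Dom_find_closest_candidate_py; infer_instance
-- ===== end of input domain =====

-- B replaces A's per-candidate set-intersection fold by an inverted word→indices index,
-- a counter dict, and a separate first-argmax scan (alternative decomposition; same results).


-- ===== PORT A =====
def find_closest_candidate_py (text : String) (candidates : List String) : Int :=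
  if text = "" then -1
  else
    let text_lower := PySem.Str.lower text
    let r := (PySem.List.enumerate candidates).foldl
      (fun (st : Int × Int) ic =>
        let c_words : PySem.Set String := PySem.Set.ofList (PySem.Str.split₀ (PySem.Str.lower ic.2))
        let t_words : PySem.Set String := PySem.Set.ofList (PySem.Str.split₀ text_lower)
        let overlap : Int := PySem.Set.len (PySem.Set.inter c_words t_words)
        if overlap > st.2 then (ic.1, overlap) else st)
      (-1, 0)
    if r.2 ≥ 3 then r.1 else -1

-- ===== PORT B =====
def find_closest_candidate_py_alt (text : String) (candidates : List String) : Int :=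
  if text = "" then -1
  else
    let index : PySem.Dict String (List Int) :=
      (PySem.List.enumerate candidates).foldl
        (fun d ic =>
          (PySem.Set.ofList (PySem.Str.split₀ (PySem.Str.lower ic.2))).foldl
            (fun d w => d.modify w [] (fun l => l ++ [ic.1])) d)
        PySem.Dict.empty
    let counts : PySem.Dict Int Int :=
      (PySem.Set.ofList (PySem.Str.split₀ (PySem.Str.lower text))).foldl
        (fun cnts w => (index.getD w []).foldl (fun cnts i => cnts.modify i 0 (fun v => v + 1)) cnts)
        PySem.Dict.empty
    (PySem.List.pyRange 0 (candidates.length : Int)).foldl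
      (fun best i =>
        let ci := counts.getD i 0
        if ci ≥ 3 ∧ (best = -1 ∨ ci > counts.getD best 0) then i else best)
      (-1)

-- ===== PRECONDITION & SPEC =====
def Spec_find_closest_candidate_py (text : String) (candidates : List String) (out : Int) : Prop := out = find_closest_candidate_py_alt text candidates
instance (text : String) (candidates : List String) (out : Int) : Decidable (Spec_find_closest_candidate_py text candidates out) := by unfold Spec_find_closest_candidate_py; infer_instance

-- ===== CLAIM (what is proved, stated in full; the proofs are below) =====
def Claim_equal_find_closest_candidate_py : Prop := ∀ (text : String) (candidates : List String), Dom_find_closest_candidate_py text candidates → Spec_find_closest_candidate_py text candidates (find_closest_candidate_py text candidates)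

-- ===== LEMMAS AND PROOFS =====

-- the distinct lowercase words of a string (definitionally the term both ports inline)
def pvWords (s : String) : PySem.Set String :=
  PySem.Set.ofList (PySem.Str.split₀ (PySem.Str.lower s))

-- the word→indices pairs B's index loop inserts, flattened
def pvPairs (candidates : List String) : List (String × Int) :=
  (PySem.List.enumerate candidates).flatMap
    (fun ic => (pvWords ic.2).map (fun w => (w, ic.1)))

-- nested foldl = foldl over the flatMap
theorem pv_foldl_foldl_flatMap {α β σ : Type} (l : List α) (g : α → List β)
    (f : σ → β → σ) (init : σ) :
    l.foldl (fun acc x => (g x).foldl f acc) init = (l.flatMap g).foldl f init := by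
  induction l generalizing init with
  | nil => rfl
  | cons x xs ih => simp [List.flatMap_cons, List.foldl_append, ih]

-- B's index, looked up: the indices of the candidates containing w
theorem pv_index_getD (candidates : List String) (w : String) :
    (((PySem.List.enumerate candidates).foldl
        (fun (d : PySem.Dict String (List Int)) ic =>
          (PySem.Set.ofList (PySem.Str.split₀ (PySem.Str.lower ic.2))).foldl
            (fun d w => d.modify w [] (fun l => l ++ [ic.1])) d)
        PySem.Dict.empty).getD w [])
      = ((pvPairs candidates).filter (fun p => p.1 == w)).map (fun p => p.2) := by
  
  have h1 : ∀ (d : PySem.Dict String (List Int)) (ic : Int × String),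
      (PySem.Set.ofList (PySem.Str.split₀ (PySem.Str.lower ic.2))).foldl
        (fun d w => d.modify w [] (fun l => l ++ [ic.1])) d
      = ((pvWords ic.2).map (fun w => (w, ic.1))).foldl
          (fun d p => d.modify p.1 [] (fun l => l ++ [p.2])) d := by
    intro d ic
    rw [List.foldl_map]
    rfl
  simp only [h1]
  rw [pv_foldl_foldl_flatMap]
  rw [show ((PySem.List.enumerate candidates).flatMap
      (fun ic => (pvWords ic.2).map (fun w => (w, ic.1)))) = pvPairs candidates from rfl]
  rw [PySem.Dict.getD_foldl_modify_append]
  simp [PySem.Dict.getD, PySem.Dict.get?, PySem.Dict.empty]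

-- one word's contribution over a nodup set: 1 if the key is in the set, else 0
theorem pv_sum_ite_mem {κ : Type} [BEq κ] [LawfulBEq κ] (W : List κ) (hW : W.Nodup)
    (k : κ) (b : Bool) :
    (W.map (fun w => if b && (k == w) then (1 : Nat) else 0)).sum
      = if b && W.contains k then 1 else 0 := by
  
  induction W with
  | nil => simp
  | cons w ws ih =>
    rw [List.nodup_cons] at hW
    rw [List.map_cons, List.sum_cons, ih hW.2]
    cases b with
    | false => simp
    | true =>
      by_cases hkw : k = w
      · subst hkw
        simp [hW.1]
      · have hne : (k == w) = false := by simp [hkw]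
        simp [hne]

-- summing per-word countP over a nodup word set collapses to membership
theorem pv_sum_countP {α κ : Type} [BEq κ] [LawfulBEq κ] (W : List κ) (hW : W.Nodup)
    (L : List α) (key : α → κ) (q : α → Bool) :
    (W.map (fun w => L.countP (fun a => q a && (key a == w)))).sum
      = L.countP (fun a => q a && W.contains (key a)) := by
  
  induction L with
  | nil => simp
  | cons a L ih =>
    have hsplit : ∀ (f g : κ → Nat) (V : List κ),
        (V.map (fun w => f w + g w)).sum = (V.map f).sum + (V.map g).sum := by
      intro f g V
      induction V with
      | nil => simp
      | cons v vs ihv => simp [ihv]; omega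
    simp only [List.countP_cons]
    rw [hsplit, ih, pv_sum_ite_mem W hW (key a) (q a)]

-- sum over enumerate pairs of an indicator at index s+j picks out candidate j
theorem pv_sum_enum_zero (cs : List String) (s : Int) (u : String → Nat) (t : Int)
    (ht : t < s) :
    ((PySem.List.enumerate cs s).map (fun ic => if ic.1 == t then u ic.2 else 0)).sum = 0 := by
  
  induction cs generalizing s with
  | nil => simp [PySem.List.enumerate]
  | cons c cs ih =>
    rw [PySem.List.enumerate_cons, List.map_cons, List.sum_cons]
    have hne : (s == t) = false := by simp; omega
    rw [hne]
    simp only [if_false, Bool.false_eq_true]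
    rw [ih (s + 1) (by omega)]

theorem pv_sum_enum (cs : List String) (s : Int) (u : String → Nat) :
    ∀ (j : Nat) (hj : j < cs.length),
    ((PySem.List.enumerate cs s).map (fun ic => if ic.1 == s + (j : Int) then u ic.2 else 0)).sum
      = u cs[j] := by
  
  induction cs generalizing s with
  | nil => intro j hj; simp at hj
  | cons c cs ih =>
    intro j hj
    rw [PySem.List.enumerate_cons, List.map_cons, List.sum_cons]
    cases j with
    | zero =>
      have ht : (s == s + ((0 : Nat) : Int)) = true := by simp
      rw [ht]
      simp only [if_true]
      rw [pv_sum_enum_zero cs (s + 1) u (s + ((0 : Nat) : Int)) (by omega)]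
      simp
    | succ j =>
      have ht : (s == s + ((j + 1 : Nat) : Int)) = false := by simp; omega
      rw [ht]
      simp only [if_false, Bool.false_eq_true]
      have harg : s + ((j + 1 : Nat) : Int) = (s + 1) + (j : Int) := by push_cast; ring
      rw [harg, ih (s + 1) j (by simpa using hj)]
      simp

-- B's counts dict, looked up at candidate index j, is A's overlap for candidate j
theorem pv_counts_getD (text : String) (candidates : List String) (j : Nat)
    (hj : j < candidates.length) :
    (((pvWords text).foldl
        (fun (cnts : PySem.Dict Int Int) w =>
          ((((PySem.List.enumerate candidates).foldl
              (fun (d : PySem.Dict String (List Int)) ic =>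
                (PySem.Set.ofList (PySem.Str.split₀ (PySem.Str.lower ic.2))).foldl
                  (fun d w => d.modify w [] (fun l => l ++ [ic.1])) d)
              PySem.Dict.empty).getD w []).foldl
            (fun cnts i => cnts.modify i 0 (fun v => v + 1)) cnts))
        PySem.Dict.empty).getD (j : Int) 0)
      = ((PySem.Set.inter (pvWords candidates[j]) (pvWords text)).length : Int) := by
  
  simp only [pv_index_getD]
  rw [pv_foldl_foldl_flatMap]
  rw [PySem.Dict.getD_foldl_modify_add_one]
  have hempty : (PySem.Dict.empty : PySem.Dict Int Int).getD (j : Int) 0 = 0 := by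
    simp [PySem.Dict.getD, PySem.Dict.get?, PySem.Dict.empty]
  rw [hempty, zero_add]
  have hW : (pvWords text).Nodup := PySem.Set.nodup_ofList _
  have hcount : ((pvWords text).flatMap
      (fun w => ((pvPairs candidates).filter (fun p => p.1 == w)).map (fun p => p.2))).count (j : Int)
      = ((PySem.Set.inter (pvWords candidates[j]) (pvWords text)).length) := by
    rw [List.count_eq_countP, List.countP_flatMap]
    simp only [Function.comp_def]
    have h1 : ∀ w : String, (((pvPairs candidates).filter (fun p => p.1 == w)).map (fun p => p.2)).countP (· == (j : Int))
        = (pvPairs candidates).countP (fun p => (p.2 == (j : Int)) && (p.1 == w)) := by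
      intro w
      rw [List.countP_map, List.countP_filter]
      rfl
    simp only [h1]
    rw [pv_sum_countP (pvWords text) hW (pvPairs candidates) (fun p => p.1) (fun p => p.2 == (j : Int))]
    unfold pvPairs
    rw [List.countP_flatMap]
    have h2 : ∀ ic : Int × String,
        ((pvWords ic.2).map (fun w => (w, ic.1))).countP
          (fun p => (p.2 == (j : Int)) && (List.contains (pvWords text) p.1))
        = (if ic.1 == (0 : Int) + (j : Int) then (pvWords ic.2).countP (fun w => List.contains (pvWords text) w) else 0) := by
      intro ic
      rw [List.countP_map]
      by_cases hij : ic.1 = (j : Int)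
      · have : (ic.1 == (0 : Int) + (j : Int)) = true := by simp [hij]
        rw [this, if_pos rfl]
        apply List.countP_congr
        intro w _
        simp [hij]
      · have h3 : (ic.1 == (0 : Int) + (j : Int)) = false := by simp; omega
        rw [h3]
        simp only [Bool.false_eq_true, if_false]
        have h4 : ∀ w ∈ (pvWords ic.2), ((fun p : String × Int => (p.2 == (j : Int)) && (List.contains (pvWords text) p.1)) ∘ (fun w => (w, ic.1))) w = false := by
          intro w _
          simp [hij]
        rw [List.countP_eq_zero.mpr (by intro w hw; simpa using h4 w hw)]
    simp only [Function.comp_def, h2]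
    rw [pv_sum_enum candidates 0 (fun c => (pvWords c).countP (fun w => List.contains (pvWords text) w)) j hj]
    rw [List.countP_eq_length_filter]
    rfl
  rw [hcount]

-- the joint scan lemma: B's thresholded first-argmax scan equals A's (best,overlap) fold
theorem pv_scan_joint (f : Int → Int) (l : List Int) :
    ∀ (bi bo best : Int),
    (∀ j ∈ l, 0 ≤ j) →
    ((bo < 3 ∧ best = -1) ∨ (3 ≤ bo ∧ 0 ≤ bi ∧ best = bi ∧ f best = bo)) →
    l.foldl (fun b j => if f j ≥ 3 ∧ (b = -1 ∨ f j > f b) then j else b) best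
      = (if (l.foldl (fun (st : Int × Int) j => if f j > st.2 then (j, f j) else st) (bi, bo)).2 ≥ 3
         then (l.foldl (fun (st : Int × Int) j => if f j > st.2 then (j, f j) else st) (bi, bo)).1
         else -1) := by
  
  induction l with
  | nil =>
    intro bi bo best _ hinv
    simp only [List.foldl_nil]
    rcases hinv with ⟨h1, h2⟩ | ⟨h1, h2, h3, h4⟩
    · rw [if_neg (by omega)]; exact h2
    · rw [if_pos (by omega)]; exact h3
  | cons j l ih =>
    intro bi bo best hpos hinv
    simp only [List.foldl_cons]
    have hjpos : (0 : Int) ≤ j := hpos j (List.mem_cons_self ..)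
    have hpos' : ∀ x ∈ l, (0 : Int) ≤ x := fun x hx => hpos x (List.mem_cons_of_mem _ hx)
    rcases hinv with ⟨hlt, hbest⟩ | ⟨hge, hbi, hbest, hf⟩
    · subst hbest
      by_cases h3 : f j ≥ 3
      · rw [if_pos (show f j ≥ 3 ∧ ((-1 : Int) = -1 ∨ f j > f (-1)) from ⟨h3, Or.inl rfl⟩),
            if_pos (show f j > bo from by omega)]
        exact ih _ _ _ hpos' (Or.inr ⟨h3, hjpos, rfl, rfl⟩)
      · rw [if_neg (show ¬ (f j ≥ 3 ∧ ((-1 : Int) = -1 ∨ f j > f (-1))) from fun h => h3 h.1)]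
        by_cases hgt : f j > bo
        · rw [if_pos (show f j > bo from hgt)]
          exact ih _ _ _ hpos' (Or.inl ⟨by omega, rfl⟩)
        · rw [if_neg (show ¬ (f j > bo) from hgt)]
          exact ih _ _ _ hpos' (Or.inl ⟨hlt, rfl⟩)
    · rw [hbest] at hf ⊢
      by_cases hgt : f j > bo
      · rw [if_pos (show f j ≥ 3 ∧ (bi = -1 ∨ f j > f bi) from ⟨by omega, Or.inr (by omega)⟩),
            if_pos (show f j > bo from hgt)]
        exact ih _ _ _ hpos' (Or.inr ⟨by omega, hjpos, rfl, rfl⟩)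
      · have hnc : ¬ (f j ≥ 3 ∧ (bi = -1 ∨ f j > f bi)) := by
          rintro ⟨hc3, hc | hc⟩
          · omega
          · rw [hf] at hc; exact hgt hc
        rw [if_neg hnc, if_neg (show ¬ (f j > bo) from hgt)]
        exact ih _ _ _ hpos' (Or.inr ⟨hge, hbi, rfl, hf⟩)

-- A's (best, overlap) fold equals B's thresholded scan, given a dict of A's overlaps
theorem pv_bridge (text : String) (candidates : List String) (cnts : PySem.Dict Int Int)
    (hc : ∀ (j : Nat), j < candidates.length →
        cnts.getD (j : Int) 0 = ((PySem.Set.inter (pvWords candidates[j]!) (pvWords text)).length : Int)) :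
    (if ((PySem.List.enumerate candidates).foldl
          (fun (st : Int × Int) ic =>
            if PySem.Set.len (PySem.Set.inter (pvWords ic.2) (pvWords text)) > st.2
            then (ic.1, PySem.Set.len (PySem.Set.inter (pvWords ic.2) (pvWords text))) else st)
          (-1, 0)).2 ≥ 3
     then ((PySem.List.enumerate candidates).foldl
          (fun (st : Int × Int) ic =>
            if PySem.Set.len (PySem.Set.inter (pvWords ic.2) (pvWords text)) > st.2
            then (ic.1, PySem.Set.len (PySem.Set.inter (pvWords ic.2) (pvWords text))) else st)
          (-1, 0)).1
     else -1)
    = (PySem.List.pyRange 0 (candidates.length : Int)).foldl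
        (fun best i =>
          if cnts.getD i 0 ≥ 3 ∧ (best = -1 ∨ cnts.getD i 0 > cnts.getD best 0) then i else best)
        (-1) := by
  have hcong : (PySem.List.enumerate candidates).foldl
      (fun (st : Int × Int) ic =>
        if PySem.Set.len (PySem.Set.inter (pvWords ic.2) (pvWords text)) > st.2
        then (ic.1, PySem.Set.len (PySem.Set.inter (pvWords ic.2) (pvWords text))) else st) (-1, 0)
    = (PySem.List.enumerate candidates).foldl
      (fun (st : Int × Int) ic => if cnts.getD ic.1 0 > st.2 then (ic.1, cnts.getD ic.1 0) else st) (-1, 0) := by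
    apply PySem.List.foldl_congr_mem
    intro acc ic hic
    rcases (PySem.List.mem_enumerate_iff _ _ _).mp hic with ⟨k, hk, rfl⟩
    dsimp only
    rw [show ((0 : Int) + (k : Int)) = ((k : Int)) from by omega]
    rw [hc k hk]
    have hg : candidates[k]! = candidates[k] := getElem!_pos candidates k hk
    rw [hg]
    rfl
  rw [hcong]
  have hfold : (PySem.List.enumerate candidates).foldl
      (fun (st : Int × Int) ic => if cnts.getD ic.1 0 > st.2 then (ic.1, cnts.getD ic.1 0) else st) (-1, 0)
      = ((PySem.List.enumerate candidates).map (fun ic => ic.1)).foldl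
          (fun (st : Int × Int) i => if cnts.getD i 0 > st.2 then (i, cnts.getD i 0) else st) (-1, 0) :=
    (List.foldl_map (f := fun ic : Int × String => ic.1)
      (g := fun (st : Int × Int) i => if cnts.getD i 0 > st.2 then (i, cnts.getD i 0) else st)
      (l := PySem.List.enumerate candidates) (init := ((-1 : Int), (0 : Int)))).symm
  rw [hfold, PySem.List.map_fst_enumerate]
  rw [show ((0 : Int) + (candidates.length : Int)) = ((candidates.length : Int)) from by omega]
  refine (pv_scan_joint (fun i => cnts.getD i 0)
      (PySem.List.pyRange 0 (candidates.length : Int) 1) (-1) 0 (-1) ?_ (Or.inl ⟨by norm_num, rfl⟩)).symm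
  intro x hx
  have hx' := PySem.List.mem_pyRange_one.mp hx
  omega

-- ===== VERDICT (by name: the statement is the Claim_ definition above) =====
theorem find_closest_candidate_py_spec : Claim_equal_find_closest_candidate_py := by
  intro text candidates _
  unfold Spec_find_closest_candidate_py find_closest_candidate_py find_closest_candidate_py_alt
  by_cases htext : text = ""
  · simp [htext]
  · rw [if_neg htext, if_neg htext]
    exact pv_bridge text candidates _
      (fun j hj => by
        rw [getElem!_pos candidates j hj]
        exact pv_counts_getD text candidates j hj)
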